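-- pv_equiv track=rewrite | github.com/ceavinrufus/tubes-daspro | functions/arraytools.py | left_strip
-- ===== SOURCE A (Python) =====
-- def panjang(arr):
--     # Fungsi yang menerima sebuah array dan menghitung panjang array tersebut
--
--     # KAMUS LOKAL
--     # pjg : integer
--
--     # ALGORITMA
--     pjg = 0
--
--     for _ in arr:       # Setiap membaca ada sebuah elemen dalam array, nilai pjg bertambah 1
--         pjg += 1
--
--     return pjg
--
-- def left_strip(word, to_remove=" "):
--     # Menghilangkan leading character pada word sesuai argumen saat memanggil fungsi
--
--     # KAMUS LOKAL
--     # new_str : string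
--     # temp : integer
--
--     # ALGORITMA
--     new_str = ""
--     temp = 0            # Variabel untuk menyimpan indeks pertama kali karakter bukan lagi yang ingin dihilangkan
--     for i in range(panjang(word)):
--         if word[i] == to_remove:
--             temp = i+1
--         else:
--             break           # Loop berhenti jika karakter-karakter awal bukan spasi
--
--     for char in range(temp, panjang(word)):  # Looping hanya dimulai dari indeks setelah karakter yang ingin dihilangkan
--         new_str += word[char]
--
--     return new_str
-- ===== SOURCE B (Python) =====
-- def left_strip(word, to_remove=" "):
--     # One fused pass: a boolean skip flag replaces A's boundary-index loop + copy loop.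
--     new_str = ""
--     stripping = True
--     for char in word:
--         if stripping and char == to_remove:
--             continue
--         stripping = False
--         new_str += char
--     return new_str
-- ===== Notes on version B (the rewrite author's own statement) =====
-- stated objective: simpler
-- what changed: Replaces A's two loops (a boundary-index scan with break, then an index-range copy loop) by one fused pass over the characters with a boolean skip flag.
import Mathlib
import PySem

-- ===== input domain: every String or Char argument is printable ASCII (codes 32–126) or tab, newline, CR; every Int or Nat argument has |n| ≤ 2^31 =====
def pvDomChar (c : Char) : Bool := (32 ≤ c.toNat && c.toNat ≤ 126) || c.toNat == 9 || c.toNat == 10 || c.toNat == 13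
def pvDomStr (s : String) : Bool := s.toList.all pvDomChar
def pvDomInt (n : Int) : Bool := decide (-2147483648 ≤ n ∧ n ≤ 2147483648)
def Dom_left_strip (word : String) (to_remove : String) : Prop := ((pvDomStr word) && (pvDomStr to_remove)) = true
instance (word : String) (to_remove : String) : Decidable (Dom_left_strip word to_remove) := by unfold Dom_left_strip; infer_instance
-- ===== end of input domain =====

-- B changes only structure (one fused pass with a flag instead of A's two loops); same values.

-- ===== PORT A =====
-- first loop: temp = 0; for i: if word[i] == to_remove then temp = i+1 else break
def leftStripScanA (cs : List Char) (t : String) (i temp : Nat) : Nat :=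
  match cs with
  | [] => temp
  | c :: rest => if String.ofList [c] = t then leftStripScanA rest t (i + 1) (i + 1) else temp

-- second loop: for char in range(temp, len): new_str += word[char]
def leftStripBuildA (cs : List Char) (acc : String) : String :=
  match cs with
  | [] => acc
  | c :: rest => leftStripBuildA rest (acc ++ String.ofList [c])

def left_strip (word : String) (to_remove : String) : String :=
  leftStripBuildA (word.toList.drop (leftStripScanA word.toList to_remove 0 0)) ""

-- ===== PORT B =====
def leftStripGoB (cs : List Char) (t : String) (stripping : Bool) (acc : String) : String :=
  match cs with
  | [] => acc
  | c :: rest =>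
      if stripping = true ∧ String.ofList [c] = t then leftStripGoB rest t stripping acc
      else leftStripGoB rest t false (acc ++ String.ofList [c])

def left_strip_alt (word : String) (to_remove : String) : String :=
  leftStripGoB word.toList to_remove true ""

-- ===== PRECONDITION & SPEC =====
def Spec_left_strip (word : String) (to_remove : String) (out : String) : Prop := out = left_strip_alt word to_remove
instance (word : String) (to_remove : String) (out : String) : Decidable (Spec_left_strip word to_remove out) := by unfold Spec_left_strip; infer_instance

-- ===== CLAIM (what is proved, stated in full; the proofs are below) =====
def Claim_equal_left_strip : Prop := ∀ (word : String) (to_remove : String), Dom_left_strip word to_remove → Spec_left_strip word to_remove (left_strip word to_remove)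

-- ===== LEMMAS AND PROOFS =====

theorem goB_false (cs : List Char) (t : String) (acc : String) :
    leftStripGoB cs t false acc = leftStripBuildA cs acc := by
  induction cs generalizing acc with
  | nil => rfl
  | cons c rest ih =>
      simp only [leftStripGoB, leftStripBuildA]
      rw [if_neg (by simp)]
      exact ih _

theorem goB_true (cs : List Char) (t : String) (acc : String) :
    leftStripGoB cs t true acc
      = leftStripBuildA (cs.dropWhile (fun c => decide (String.ofList [c] = t))) acc := by
  induction cs generalizing acc with
  | nil => rfl
  | cons c rest ih =>
      by_cases h : String.ofList [c] = t
      · rw [leftStripGoB, if_pos ⟨rfl, h⟩, ih]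
        simp [List.dropWhile, h]
      · rw [leftStripGoB, if_neg (fun hc => h hc.2), goB_false]
        simp [List.dropWhile, h, leftStripBuildA]

theorem scanA_eq (cs : List Char) (t : String) (i : Nat) :
    leftStripScanA cs t i i = i + (cs.takeWhile (fun c => decide (String.ofList [c] = t))).length := by
  induction cs generalizing i with
  | nil => simp [leftStripScanA]
  | cons c rest ih =>
      by_cases h : String.ofList [c] = t
      · rw [leftStripScanA, if_pos h, ih]
        simp only [List.takeWhile, h, decide_true, List.length_cons]
        omega
      · simp [leftStripScanA, List.takeWhile, h]

theorem drop_takeWhile_length (p : Char → Bool) (cs : List Char) :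
    cs.drop (cs.takeWhile p).length = cs.dropWhile p := by
  induction cs with
  | nil => rfl
  | cons c rest ih =>
      by_cases h : p c
      · simp [List.takeWhile, List.dropWhile, h, ih]
      · simp [List.takeWhile, List.dropWhile, h]

-- ===== VERDICT (by name: the statement is the Claim_ definition above) =====
theorem left_strip_spec : Claim_equal_left_strip := by
  intro word t _
  show left_strip word t = left_strip_alt word t
  unfold left_strip left_strip_alt
  rw [goB_true, scanA_eq, Nat.zero_add, drop_takeWhile_length]
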